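-- pv_equiv track=rewrite | github.com/dwittle/hexplot | hex.py | hex_region_axial
-- ===== SOURCE A (Python) =====
-- def hex_region_axial(side):
--     """Axial coordinates (q,r) in a hex-shaped region with 'side' tiles per edge."""
--     R = side - 1
--     coords = []
--     for q in range(-R, R + 1):
--         for r in range(-R, R + 1):
--             if abs(q + r) <= R and abs(q) <= R and abs(r) <= R:
--                 coords.append((q, r))
--     return coords
-- ===== SOURCE B (Python) =====
-- def hex_region_axial(side):
--     """Axial coordinates (q,r) in a hex-shaped region with 'side' tiles per edge."""
--     R = side - 1
--     coords = []
--     if R < 0: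
--         return coords
--     q, r = -R, 0
--     while True:
--         coords.append((q, r))
--         if r < min(R, R - q):
--             r += 1
--         else:
--             q += 1
--             if q > R:
--                 break
--             r = max(-R, -R - q)
--     return coords
-- ===== Notes on version B (the rewrite author's own statement) =====
-- stated objective: alternative
-- what changed: B replaces A's nested q/r loops with a membership filter by a single flat odometer loop over one (q, r) cursor that advances r and carries into the next row with analytically computed row bounds.
import Mathlib
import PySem

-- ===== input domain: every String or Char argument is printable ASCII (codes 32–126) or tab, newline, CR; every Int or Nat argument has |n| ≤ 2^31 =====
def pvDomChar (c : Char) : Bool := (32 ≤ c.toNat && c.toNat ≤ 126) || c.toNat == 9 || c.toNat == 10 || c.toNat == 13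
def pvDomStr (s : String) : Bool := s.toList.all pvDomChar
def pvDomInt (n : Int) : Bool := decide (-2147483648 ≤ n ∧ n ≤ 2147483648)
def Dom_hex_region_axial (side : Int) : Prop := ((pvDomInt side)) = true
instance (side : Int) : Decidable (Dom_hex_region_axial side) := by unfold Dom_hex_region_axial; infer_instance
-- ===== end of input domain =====

-- B replaces A's nested loops plus membership filter by a single flat odometer loop
-- over one (q, r) cursor with a carry into the next row (objective: alternative).

-- ===== PORT A =====
def hex_region_axial (side : Int) : List (Int × Int) :=
  let R := side - 1
  (PySem.List.pyRange (-R) (R + 1) 1).foldl (fun coords q =>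
    (PySem.List.pyRange (-R) (R + 1) 1).foldl (fun coords r =>
      if |q + r| ≤ R ∧ |q| ≤ R ∧ |r| ≤ R then coords ++ [(q, r)] else coords) coords) []

-- ===== PORT B =====
-- the 'while True' loop of Source B: append the cursor, then advance r or carry to the next row
def hexWalk (R q r : Int) (acc : List (Int × Int)) : List (Int × Int) :=
  let acc' := acc ++ [(q, r)]
  if h : r < min R (R - q) then hexWalk R q (r + 1) acc'
  else if h2 : q + 1 > R then acc'
  else hexWalk R (q + 1) (max (-R) (-R - (q + 1))) acc'
termination_by ((R - q).toNat, (min R (R - q) - r).toNat)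
decreasing_by
  · exact Prod.Lex.right _ (by omega)
  · exact Prod.Lex.left _ _ (by omega)

def hex_region_axial_alt (side : Int) : List (Int × Int) :=
  let R := side - 1
  if R < 0 then []
  else hexWalk R (-R) 0 []

-- ===== PRECONDITION & SPEC =====
def Spec_hex_region_axial (side : Int) (out : List (Int × Int)) : Prop := out = hex_region_axial_alt side
instance (side : Int) (out : List (Int × Int)) : Decidable (Spec_hex_region_axial side out) := by unfold Spec_hex_region_axial; infer_instance

-- ===== CLAIM (what is proved, stated in full; the proofs are below) =====
def Claim_equal_hex_region_axial : Prop := ∀ (side : Int), Dom_hex_region_axial side → Spec_hex_region_axial side (hex_region_axial side)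

-- ===== LEMMAS AND PROOFS =====

-- the row of coordinates emitted for a fixed q
def hexRow (R q : Int) : List (Int × Int) :=
  (PySem.List.pyRange (max (-R) (-R - q)) (min R (R - q) + 1) 1).map (fun r => (q, r))

-- Filtering an increasing unit range by an interval membership test yields the clipped range.
theorem filter_pyRange_interval (lo hi : Int) : ∀ (n : Nat) (a b : Int), (b - a).toNat = n →
    (PySem.List.pyRange a b 1).filter (fun r => decide (lo ≤ r ∧ r ≤ hi)) =
      PySem.List.pyRange (max a lo) (min b (hi + 1)) 1 := by
  intro n
  induction n with
  | zero =>
    intro a b h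
    rw [PySem.List.pyRange_one_eq_nil (by omega), PySem.List.pyRange_one_eq_nil (by omega)]
    rfl
  | succ n ih =>
    intro a b h
    rw [PySem.List.pyRange_one_cons (by omega), List.filter_cons,
      ih (a + 1) b (by omega)]
    by_cases hlo : lo ≤ a
    · by_cases hhi : a ≤ hi
      · simp only [hlo, hhi, and_self, decide_true, if_true]
        rw [PySem.List.pyRange_one_cons (lt_min (by omega) (by omega)) (a := max a lo)]
        have h1 : max a lo = a := by omega
        have h2 : max (a + 1) lo = max a lo + 1 := by omega
        rw [h1] at *
        rw [h2, h1]
      · have : ¬ (lo ≤ a ∧ a ≤ hi) := by omega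
        simp only [this, decide_false, Bool.false_eq_true, if_false]
        rw [PySem.List.pyRange_one_eq_nil (by omega),
          PySem.List.pyRange_one_eq_nil (by omega)]
    · have : ¬ (lo ≤ a ∧ a ≤ hi) := by omega
      simp only [this, decide_false, Bool.false_eq_true, if_false]
      have : max (a + 1) lo = max a lo := by omega
      rw [this]

-- A equals the concatenation of the per-q rows.
theorem hexA_eq_flatMap (side : Int) :
    hex_region_axial side =
      (PySem.List.pyRange (-(side - 1)) ((side - 1) + 1) 1).flatMap (hexRow (side - 1)) := by
  unfold hex_region_axial
  set R := side - 1 with hR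
  rw [show ((PySem.List.pyRange (-R) (R + 1) 1).foldl (fun coords q =>
      (PySem.List.pyRange (-R) (R + 1) 1).foldl (fun coords r =>
        if |q + r| ≤ R ∧ |q| ≤ R ∧ |r| ≤ R then coords ++ [(q, r)] else coords) coords) [])
      = (PySem.List.pyRange (-R) (R + 1) 1).foldl (fun coords q => coords ++ hexRow R q) [] from ?_,
    PySem.List.foldl_append_eq_flatMap]
  · simp
  · apply PySem.List.foldl_congr_mem'
    intro q hq coords
    have hqR : -R ≤ q ∧ q < R + 1 := (PySem.List.mem_pyRange_one).1 hq
    rw [PySem.List.foldl_append_ite (p := fun r => |q + r| ≤ R ∧ |q| ≤ R ∧ |r| ≤ R)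
        (f := fun r => (q, r))]
    have hpred : ∀ r : Int,
        (decide (|q + r| ≤ R ∧ |q| ≤ R ∧ |r| ≤ R)) =
        (decide (max (-R) (-R - q) ≤ r ∧ r ≤ min R (R - q))) := by
      intro r
      rw [decide_eq_decide, abs_eq_max_neg, abs_eq_max_neg, abs_eq_max_neg]
      omega
    unfold hexRow
    congr 1
    congr 1
    rw [funext hpred,
      filter_pyRange_interval (max (-R) (-R - q)) (min R (R - q)) (R + 1 - (-R)).toNat
        (-R) (R + 1) rfl]
    congr 1
    · omega
    · omega

-- The odometer loop from a valid cursor emits the rest of the current row and all later rows.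
theorem hexWalk_eq (R q r : Int) (acc : List (Int × Int))
    (h1 : -R ≤ q) (h2 : q ≤ R) (h3 : max (-R) (-R - q) ≤ r) (h4 : r ≤ min R (R - q)) :
    hexWalk R q r acc =
      acc ++ (PySem.List.pyRange r (min R (R - q) + 1) 1).map (fun r' => (q, r'))
          ++ (PySem.List.pyRange (q + 1) (R + 1) 1).flatMap (hexRow R) := by
  fun_induction hexWalk R q r acc with
  | case1 q r acc acc' h ih =>
    rw [ih (by omega) (by omega) (by omega) (by omega),
      PySem.List.pyRange_one_cons (a := r) (by omega)]
    simp [acc']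
  | case2 q r acc acc' h hgt =>
    have hr : min R (R - q) = r := by omega
    rw [hr, PySem.List.pyRange_one_singleton,
      PySem.List.pyRange_one_eq_nil (b := R + 1) (by omega)]
    simp [acc']
  | case3 q r acc acc' h hle ih =>
    have hr : min R (R - q) = r := by omega
    have hlohi : max (-R) (-R - (q + 1)) ≤ min R (R - (q + 1)) := by
      simp only [max_le_iff, le_min_iff]; omega
    rw [ih (by omega) (by omega) (le_refl _) hlohi,
      PySem.List.pyRange_one_cons (a := q + 1) (b := R + 1) (by omega),
      hr, PySem.List.pyRange_one_singleton]
    simp [acc', hexRow]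

-- ===== VERDICT (by name: the statement is the Claim_ definition above) =====
theorem hex_region_axial_spec : Claim_equal_hex_region_axial := by
  intro side _
  unfold Spec_hex_region_axial hex_region_axial_alt
  rw [hexA_eq_flatMap]
  set R := side - 1 with hR
  by_cases hneg : R < 0
  · rw [if_pos hneg, PySem.List.pyRange_one_eq_nil (by omega)]
    rfl
  · rw [if_neg hneg]
    rw [hexWalk_eq R (-R) 0 [] (by omega) (by omega)
        (by simp only [max_le_iff]; omega) (by simp only [le_min_iff]; omega),
      PySem.List.pyRange_one_cons (a := -R) (b := R + 1) (by omega)]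
    have e1 : max (-R) (-R - -R) = 0 := by
      have h0 : (-R : Int) - -R = 0 := by ring
      rw [h0]; exact max_eq_right (by omega)
    have e2 : min R (R - -R) = R := min_eq_left (by omega)
    simp only [List.flatMap_cons, List.nil_append, hexRow, e1, e2]
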